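-- pv_equiv track=rewrite | github.com/bejeri4/Algo | LeetCode/GoGoGo/NumberOfWaysToReorderArrayToGetSameBST.py | numOfWaysRec
-- ===== SOURCE A (Python) =====
-- mod = 1000000007
--
-- def comb(m, n, memo):
-- 	if n > m:
-- 		return 0
-- 	if n == 0 or n == m:
-- 		return 1
-- 	if memo[m][n] is not None:
-- 		return memo[m][n]
-- 	res = (comb(m - 1, n - 1, memo) % mod + comb(m - 1, n, memo) % mod) % mod
-- 	memo[m][n] = res
-- 	return res
--
-- def numOfWaysRec(nums, memo):
-- 	if len(nums) < 3:
-- 		return 1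
-- 	less, more = [], []
-- 	for elem in nums[1:]:
-- 		if elem < nums[0]:
-- 			less.append(elem)
-- 		else:
-- 			more.append(elem)
-- 	res = comb(len(nums) - 1, len(less), memo) % mod
-- 	res = (res * numOfWaysRec(less, memo)) % mod
-- 	res = (res * numOfWaysRec(more, memo)) % mod
-- 	return res
-- ===== SOURCE B (Python) =====
-- mod = 1000000007
--
-- def numOfWaysRec(nums, memo):
--     # Build the BST by inserting nums in order (>= goes right), then multiply
--     # C(size-1, left_size) over all nodes in a post-order pass; memo is unused.
--     root = None
--     for x in nums:
--         if root is None: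
--             root = [x, None, None]
--         else:
--             cur = root
--             while True:
--                 i = 1 if x < cur[0] else 2
--                 if cur[i] is None:
--                     cur[i] = [x, None, None]
--                     break
--                 cur = cur[i]
--
--     def comb(m, n):
--         r = 1
--         for i in range(n):
--             r = r * (m - i) // (i + 1)
--         return r
--
--     def go(node):
--         if node is None:
--             return (0, 1)
--         sl, pl = go(node[1])
--         sr, pr = go(node[2])
--         s = sl + sr + 1
--         prod = (pl * pr) % mod
--         prod = prod * (comb(s - 1, sl) % mod) % mod
--         return (s, prod)
--
--     return go(root)[1]
-- ===== Notes on version B (the rewrite author's own statement) =====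
-- stated objective: alternative
-- what changed: B builds an explicit BST by inserting nums in order and takes the product of C(size-1,left_size) mod 1e9+7 over its nodes (binomials by the exact multiplicative formula), instead of A's recursive partition of the list with a memoized Pascal-triangle comb; B ignores the memo argument (A fills it as a side effect), so Pre_ restricts memo to the intended calling convention: a fresh all-None table large enough for the list (or fewer than 3 elements, where A never touches memo).
-- outside the precondition, e.g. on numOfWaysRec([2, 1, 3], [[None, None, None], [None, None, None], [None, 5, None]]): A returns 5, B returns 2
import Mathlib
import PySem

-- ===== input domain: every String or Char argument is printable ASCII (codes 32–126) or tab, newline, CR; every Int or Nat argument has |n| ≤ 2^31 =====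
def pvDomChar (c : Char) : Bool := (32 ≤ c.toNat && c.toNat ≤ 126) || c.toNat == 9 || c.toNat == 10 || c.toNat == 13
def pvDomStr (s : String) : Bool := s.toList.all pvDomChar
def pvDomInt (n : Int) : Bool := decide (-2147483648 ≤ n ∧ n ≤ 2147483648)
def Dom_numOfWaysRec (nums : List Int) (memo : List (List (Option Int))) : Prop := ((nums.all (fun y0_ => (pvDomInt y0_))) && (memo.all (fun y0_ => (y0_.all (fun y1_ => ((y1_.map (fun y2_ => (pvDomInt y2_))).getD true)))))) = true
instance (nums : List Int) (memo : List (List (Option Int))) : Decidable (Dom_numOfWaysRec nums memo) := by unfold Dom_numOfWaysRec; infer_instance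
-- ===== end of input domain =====

-- B counts reorderings by building an explicit BST and multiplying C(size-1,left_size) mod 1e9+7
-- over its nodes (exact multiplicative binomials) instead of A's recursive list partition with a
-- memoized Pascal comb; A fills the caller's memo as a side effect, B never touches it — the
-- equivalence proved here is about the RETURN value only.

-- ===== PORT A =====
def pvModA : Int := 1000000007   -- module constant `mod`

-- comb(m, n, memo): m and n are list lengths, nonnegative in every call A makes, so they are
-- carried as Nat; the memo reads memo[m][n] are ported with pyGet? (none = IndexError).
def combA (m n : Nat) (memo : List (List (Option Int))) : Option (Int × List (List (Option Int))) :=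
  if _h1 : m < n then some (0, memo)
  else if _h2 : n = 0 ∨ n = m then some (1, memo)
  else
    match PySem.List.pyGet? memo (m : Int) with
    | none => none
    | some row =>
      match PySem.List.pyGet? row (n : Int) with
      | none => none
      | some (some v) => some (v, memo)
      | some none =>
        match combA (m - 1) (n - 1) memo with
        | none => none
        | some (a, memo1) =>
          match combA (m - 1) n memo1 with
          | none => none
          | some (b, memo2) =>
            let res := (a % pvModA + b % pvModA) % pvModA
            some (res, memo2.set m ((memo2.getD m []).set n (some res)))
termination_by m
decreasing_by all_goals omega

-- the partition loop of numOfWaysRec ("for elem in nums[1:]: …append…")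
def partA (h : Int) (t : List Int) : List Int × List Int :=
  t.foldl (fun acc elem => if elem < h then (acc.1 ++ [elem], acc.2) else (acc.1, acc.2 ++ [elem])) ([], [])

-- needed by recA's termination proof, hence stated above the port
theorem partA_eq_filter (h : Int) (t : List Int) :
    partA h t = (t.filter (fun x => decide (x < h)), t.filter (fun x => !decide (x < h))) := by
  suffices H : ∀ acc : List Int × List Int,
      t.foldl (fun acc elem => if elem < h then (acc.1 ++ [elem], acc.2) else (acc.1, acc.2 ++ [elem])) acc
        = (acc.1 ++ t.filter (fun x => decide (x < h)), acc.2 ++ t.filter (fun x => !decide (x < h))) by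
    simpa [partA] using H ([], [])
  induction t with
  | nil => simp
  | cons x xs ih =>
    intro acc
    by_cases hx : x < h <;> simp [List.foldl_cons, hx, ih]

-- numOfWaysRec with the memo threaded through; none = an exception escaped (IndexError in comb)
def recA (nums : List Int) (memo : List (List (Option Int))) : Option (Int × List (List (Option Int))) :=
  if _h0 : nums.length < 3 then some (1, memo)
  else
    match nums with
    | [] => some (1, memo)   -- unreachable: length ≥ 3
    | h :: t =>
      let lm := partA h t
      match combA ((h :: t).length - 1) lm.1.length memo with
      | none => none
      | some (c, memo1) =>
        let res := c % pvModA
        match recA lm.1 memo1 with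
        | none => none
        | some (w1, memo2) =>
          let res := (res * w1) % pvModA
          match recA lm.2 memo2 with
          | none => none
          | some (w2, memo3) => some ((res * w2) % pvModA, memo3)
termination_by nums.length
decreasing_by
  · simp only [partA_eq_filter]
    have := List.length_filter_le (fun x => decide (x < h)) t
    simp only [List.length_cons]; omega
  · simp only [partA_eq_filter]
    have := List.length_filter_le (fun x => !decide (x < h)) t
    simp only [List.length_cons]; omega

def numOfWaysRec (nums : List Int) (memo : List (List (Option Int))) : Int :=
  match recA nums memo with
  | some r => r.1
  | none => 0   -- unreachable under Pre_: exactly where the Python raises IndexError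

-- ===== PORT B =====
def pvModB : Int := 1000000007   -- module constant `mod` of Source B

inductive BTree where
  | leaf : BTree
  | node : Int → BTree → BTree → BTree

-- one BST insertion (the while-loop of Source B, descending the tree)
def bInsert : BTree → Int → BTree
  | .leaf, x => .node x .leaf .leaf
  | .node v l r, x => if x < v then .node v (bInsert l x) r else .node v l (bInsert r x)

-- "for x in nums: insert"
def bBuild (nums : List Int) : BTree := nums.foldl bInsert .leaf

-- comb(m, n): exact multiplicative formula, r = r * (m - i) // (i + 1) over range(n)
def bComb (m n : Int) : Int :=
  (PySem.List.pyRange 0 n 1).foldl (fun r i => PySem.Int.floordiv (r * (m - i)) (i + 1)) 1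

-- go(node): post-order (size, product)
def bGo : BTree → Int × Int
  | .leaf => (0, 1)
  | .node _ l r =>
    let sl := (bGo l).1
    let pl := (bGo l).2
    let sr := (bGo r).1
    let pr := (bGo r).2
    let s := sl + sr + 1
    let prod := (pl * pr) % pvModB
    (s, prod * (bComb (s - 1) sl % pvModB) % pvModB)

def numOfWaysRec_alt (nums : List Int) (memo : List (List (Option Int))) : Int :=
  (bGo (bBuild nums)).2

-- ===== PRECONDITION & SPEC =====
-- Pre_ excludes memos that are too small in a row comb can index (A raises IndexError there)
-- and memos carrying pre-filled entries in cells comb can read (row i < len(nums), columns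
-- 1..i-1), whose arbitrary cached values A trusts blindly and returns — an artefact of the
-- cache argument, not of the input list; rows/cells comb can never touch are unconstrained,
-- and any memo is admitted when len(nums) < 3, where A never reads it.
def Pre_numOfWaysRec (nums : List Int) (memo : List (List (Option Int))) : Prop :=
  nums.length < 3 ∨
    (nums.length ≤ memo.length ∧ ∀ i, i < nums.length →
      i ≤ (memo.getD i []).length ∧ ∀ j, 1 ≤ j → j < i → (memo.getD i []).getD j none = none)
instance (nums : List Int) (memo : List (List (Option Int))) : Decidable (Pre_numOfWaysRec nums memo) := by
  unfold Pre_numOfWaysRec; infer_instance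

def pvWitness_numOfWaysRec : List Int × List (List (Option Int)) :=
  ([2, 1, 3], [[none, none, none], [none, none, none], [none, none, none]])

def Spec_numOfWaysRec (nums : List Int) (memo : List (List (Option Int))) (out : Int) : Prop := out = numOfWaysRec_alt nums memo
instance (nums : List Int) (memo : List (List (Option Int))) (out : Int) : Decidable (Spec_numOfWaysRec nums memo out) := by unfold Spec_numOfWaysRec; infer_instance

-- ===== CLAIM (what is proved, stated in full; the proofs are below) =====
def Claim_equal_numOfWaysRec : Prop := ∀ (nums : List Int) (memo : List (List (Option Int))), Dom_numOfWaysRec nums memo → Pre_numOfWaysRec nums memo → Spec_numOfWaysRec nums memo (numOfWaysRec nums memo)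

-- ===== LEMMAS AND PROOFS =====

-- the common value: C(m, n) mod 1e9+7, as an Int
def cSpec (m n : Nat) : Int := ((Nat.choose m n % 1000000007 : Nat) : Int)

-- the recursion both programs compute (memo-free specification of A's recursion)
def W (nums : List Int) : Int :=
  if nums.length < 3 then 1
  else
    match nums with
    | [] => 1
    | h :: t =>
      let lm := partA h t
      ((cSpec t.length lm.1.length * W lm.1) % pvModA * W lm.2) % pvModA
termination_by nums.length
decreasing_by
  · simp only [partA_eq_filter]
    have := List.length_filter_le (fun x => decide (x < h)) t
    simp only [List.length_cons]; omega
  · simp only [partA_eq_filter]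
    have := List.length_filter_le (fun x => !decide (x < h)) t
    simp only [List.length_cons]; omega

-- every memo cell comb can touch (row m < k, column 1 ≤ n < m) is either None or correct
def GoodM (memo : List (List (Option Int))) (k : Nat) : Prop :=
  ∀ (m n : Nat) (row : List (Option Int)) (v : Int),
    m < k → 1 ≤ n → n < m → memo[m]? = some row → row[n]? = some (some v) → v = cSpec m n

-- the memo is big enough for all comb calls with top row index < k
def ShapeM (memo : List (List (Option Int))) (k : Nat) : Prop :=
  k ≤ memo.length ∧ ∀ (i : Nat) (row : List (Option Int)), i < k → memo[i]? = some row → i ≤ row.length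

theorem cSpec_emod (a b : Nat) : cSpec a b % pvModA = cSpec a b := by
  unfold cSpec pvModA
  omega

theorem cSpec_pascal (m n : Nat) (h1 : 1 ≤ n) (h2 : n < m) :
    (cSpec (m - 1) (n - 1) % pvModA + cSpec (m - 1) n % pvModA) % pvModA = cSpec m n := by
  obtain ⟨m', rfl⟩ : ∃ m', m = m' + 1 := ⟨m - 1, by omega⟩
  obtain ⟨n', rfl⟩ : ∃ n', n = n' + 1 := ⟨n - 1, by omega⟩
  have hpas := Nat.choose_succ_succ m' n'
  simp only [Nat.succ_eq_add_one] at hpas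
  rw [cSpec_emod, cSpec_emod]
  unfold cSpec pvModA
  simp only [Nat.add_sub_cancel]
  omega

-- writing a correct value into a good, well-shaped memo preserves both invariants
theorem goodm_shapem_set (memo : List (List (Option Int))) (k m n : Nat) (v : Int)
    (hG : GoodM memo k) (hS : ShapeM memo k) (hm : m < memo.length) (hmk : m < k)
    (hv : v = cSpec m n) :
    GoodM (memo.set m ((memo.getD m []).set n (some v))) k ∧
      ShapeM (memo.set m ((memo.getD m []).set n (some v))) k := by
  have hrow : memo.getD m [] = memo[m] := by
    rw [List.getD_eq_getElem?_getD, List.getElem?_eq_getElem hm]; rfl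
  constructor
  · intro i j row' w hik hj1 hji hrow' hcell'
    rw [List.getElem?_set] at hrow'
    by_cases him : m = i
    · subst him
      rw [if_pos rfl, if_pos hm] at hrow'
      have hr2 : row' = (memo.getD m []).set n (some v) := (Option.some.inj hrow').symm
      subst hr2
      rw [hrow, List.getElem?_set] at hcell'
      by_cases hjn : n = j
      · subst hjn
        by_cases hnl : n < memo[m].length
        · rw [if_pos rfl, if_pos hnl] at hcell'
          have hw : some v = some w := Option.some.inj hcell'
          rw [← Option.some.inj hw, hv]
        · rw [if_pos rfl, if_neg hnl] at hcell'
          exact absurd hcell' (by simp)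
      · rw [if_neg hjn] at hcell'
        exact hG m j memo[m] w hik hj1 hji (List.getElem?_eq_getElem hm) hcell'
    · rw [if_neg him] at hrow'
      exact hG i j row' w hik hj1 hji hrow' hcell'
  · constructor
    · rw [List.length_set]; exact hS.1
    · intro i row' hik hrow'
      rw [List.getElem?_set] at hrow'
      by_cases him : m = i
      · subst him
        rw [if_pos rfl, if_pos hm] at hrow'
        have hr2 : row' = (memo.getD m []).set n (some v) := (Option.some.inj hrow').symm
        subst hr2
        rw [List.length_set, hrow]
        exact hS.2 m memo[m] hmk (List.getElem?_eq_getElem hm)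
      · rw [if_neg him] at hrow'
        exact hS.2 i row' hik hrow'

theorem combA_correct (m : Nat) : ∀ (n : Nat) (memo : List (List (Option Int))) (k : Nat),
    GoodM memo k → ShapeM memo k → n ≤ m → m < k →
    ∃ memo', combA m n memo = some (cSpec m n, memo') ∧ GoodM memo' k ∧ ShapeM memo' k := by
  induction m using Nat.strong_induction_on with
  | _ m IH =>
  intro n memo k hG hS hnm hmk
  rw [combA, dif_neg (by omega : ¬ m < n)]
  by_cases h2 : n = 0 ∨ n = m
  · rw [dif_pos h2]
    refine ⟨memo, ?_, hG, hS⟩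
    have hc : cSpec m n = 1 := by
      rcases h2 with rfl | rfl
      · simp [cSpec]
      · simp [cSpec, Nat.choose_self]
    rw [hc]
  · rw [dif_neg h2]
    have hn1 : 1 ≤ n := by omega
    have hnm' : n < m := by omega
    obtain ⟨hk, hrows⟩ := hS
    have hmlen : m < memo.length := by omega
    have hrowq : memo[m]? = some memo[m] := List.getElem?_eq_getElem hmlen
    have hrl : m ≤ memo[m].length := hrows m memo[m] hmk hrowq
    have hnrow : n < memo[m].length := by omega
    simp only [PySem.List.pyGet?_natCast, hrowq, List.getElem?_eq_getElem hnrow]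
    cases hcell : memo[m][n] with
    | some v =>
      have hv : v = cSpec m n :=
        hG m n memo[m] v hmk hn1 hnm' hrowq (by rw [List.getElem?_eq_getElem hnrow, hcell])
      exact ⟨memo, by rw [hv], hG, ⟨hk, hrows⟩⟩
    | none =>
      obtain ⟨memo1, he1, hG1, hS1⟩ :=
        IH (m - 1) (by omega) (n - 1) memo k hG ⟨hk, hrows⟩ (by omega) (by omega)
      obtain ⟨memo2, he2, hG2, hS2⟩ :=
        IH (m - 1) (by omega) n memo1 k hG1 hS1 (by omega) (by omega)
      have hresv : (cSpec (m - 1) (n - 1) % pvModA + cSpec (m - 1) n % pvModA) % pvModA = cSpec m n :=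
        cSpec_pascal m n hn1 hnm'
      obtain ⟨hG', hS'⟩ :=
        goodm_shapem_set memo2 k m n (cSpec m n) hG2 hS2 (by have := hS2.1; omega) hmk rfl
      refine ⟨_, ?_, hG', hS'⟩
      simp only [he1, he2]
      rw [hresv]

theorem W_cons (h : Int) (t : List Int) (h3 : ¬ (h :: t).length < 3) :
    W (h :: t) = ((cSpec t.length (partA h t).1.length * W (partA h t).1) % pvModA
      * W (partA h t).2) % pvModA := by
  rw [W.eq_def, if_neg h3]

theorem recA_correct (N : Nat) : ∀ (nums : List Int) (memo : List (List (Option Int))) (k : Nat),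
    nums.length ≤ N → GoodM memo k → ShapeM memo k → nums.length ≤ k →
    ∃ memo', recA nums memo = some (W nums, memo') ∧ GoodM memo' k ∧ ShapeM memo' k := by
  induction N with
  | zero =>
    intro nums memo k hN hG hS hk
    have h3 : nums.length < 3 := by omega
    rw [recA, dif_pos h3]
    exact ⟨memo, by rw [W.eq_def, if_pos h3], hG, hS⟩
  | succ N IH =>
    intro nums memo k hN hG hS hk
    by_cases h3 : nums.length < 3
    · rw [recA, dif_pos h3]
      exact ⟨memo, by rw [W.eq_def, if_pos h3], hG, hS⟩
    · rw [recA, dif_neg h3]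
      cases nums with
      | nil => simp at h3
      | cons h t =>
        have hl1 : (partA h t).1.length ≤ t.length := by
          rw [partA_eq_filter]; exact List.length_filter_le _ t
        have hl2 : (partA h t).2.length ≤ t.length := by
          rw [partA_eq_filter]; exact List.length_filter_le _ t
        have hNt : t.length ≤ N := by simp only [List.length_cons] at hN; omega
        have hkt : t.length < k := by simp only [List.length_cons] at hk; omega
        obtain ⟨memo1, he1, hG1, hS1⟩ :=
          combA_correct t.length (partA h t).1.length memo k hG hS hl1 hkt
        obtain ⟨memo2, he2, hG2, hS2⟩ :=
          IH (partA h t).1 memo1 k (by omega) hG1 hS1 (by omega)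
        obtain ⟨memo3, he3, hG3, hS3⟩ :=
          IH (partA h t).2 memo2 k (by omega) hG2 hS2 (by omega)
        refine ⟨memo3, ?_, hG3, hS3⟩
        simp only [List.length_cons, Nat.add_sub_cancel, he1, he2, he3]
        rw [cSpec_emod, W_cons h t h3]

theorem bComb_zero (m : Int) : bComb m 0 = 1 := by
  rw [bComb, show PySem.List.pyRange 0 0 1 = [] from by decide]
  rfl

theorem bComb_choose (m n : Nat) (h : n ≤ m) :
    bComb (m : Int) (n : Int) = (Nat.choose m n : Int) := by
  induction n with
  | zero => simpa using bComb_zero (m : Int)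
  | succ n ih =>
    have hn : n ≤ m := by omega
    have hb : (PySem.List.pyRange 0 (n : Int) 1).foldl
        (fun r i => PySem.Int.floordiv (r * ((m : Int) - i)) (i + 1)) 1
        = ((Nat.choose m n : Nat) : Int) := by
      have := ih hn; rw [bComb] at this; exact this
    rw [bComb, show ((n + 1 : Nat) : Int) = (n : Int) + 1 by push_cast; ring,
        PySem.List.pyRange_one_succ_right (by positivity), List.foldl_append]
    simp only [List.foldl_cons, List.foldl_nil, hb]
    rw [show ((m : Int) - (n : Int)) = ((m - n : Nat) : Int) by push_cast [hn]; ring,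
        show ((n : Int) + 1) = ((n + 1 : Nat) : Int) by push_cast; ring,
        ← Nat.cast_mul, PySem.Int.floordiv_natCast]
    have hdiv : Nat.choose m n * (m - n) / (n + 1) = Nat.choose m (n + 1) := by
      rw [← Nat.choose_succ_right_eq m n]
      exact Nat.mul_div_cancel _ (by omega)
    exact_mod_cast congrArg (Nat.cast : Nat → Int) hdiv

theorem bGo_node (v : Int) (l r : BTree) :
    bGo (.node v l r) = ((bGo l).1 + (bGo r).1 + 1,
      ((bGo l).2 * (bGo r).2) % pvModB
        * (bComb ((bGo l).1 + (bGo r).1 + 1 - 1) (bGo l).1 % pvModB) % pvModB) := rfl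

theorem bGo_insert_fst (t : BTree) (x : Int) : (bGo (bInsert t x)).1 = (bGo t).1 + 1 := by
  induction t with
  | leaf => rfl
  | node v l r ihl ihr =>
    by_cases hx : x < v
    · simp only [bInsert, if_pos hx, bGo_node, ihl]; ring
    · simp only [bInsert, if_neg hx, bGo_node, ihr]; ring

theorem bGo_foldl_fst (xs : List Int) : ∀ t : BTree,
    (bGo (xs.foldl bInsert t)).1 = (bGo t).1 + xs.length := by
  induction xs with
  | nil => intro t; simp
  | cons x xs ih =>
    intro t
    rw [List.foldl_cons, ih (bInsert t x), bGo_insert_fst]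
    simp only [List.length_cons]
    push_cast; ring

theorem bBuild_fst (xs : List Int) : (bGo (bBuild xs)).1 = (xs.length : Int) := by
  rw [bBuild, bGo_foldl_fst xs BTree.leaf, show bGo BTree.leaf = (0, 1) from rfl]
  ring

theorem insertAll_node (v : Int) (xs : List Int) : ∀ (l r : BTree),
    xs.foldl bInsert (.node v l r)
      = .node v ((xs.filter fun x => decide (x < v)).foldl bInsert l)
          ((xs.filter fun x => !decide (x < v)).foldl bInsert r) := by
  induction xs with
  | nil => intro l r; simp
  | cons x xs ih =>
    intro l r
    by_cases hx : x < v
    · simp only [List.foldl_cons, bInsert, if_pos hx, List.filter_cons,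
        decide_eq_true hx, Bool.not_true, if_pos, ih]
      simp [hx]
    · simp only [List.foldl_cons, bInsert, if_neg hx, List.filter_cons, ih]
      simp only [decide_eq_true_eq]
      simp [hx]

theorem emod_mul_left (a b : Int) :
    (a % 1000000007 * b) % 1000000007 = (a * b) % 1000000007 := by
  rw [Int.mul_emod, Int.emod_emod_of_dvd _ dvd_rfl, ← Int.mul_emod]

theorem emod_mul_right (a b : Int) :
    (a * (b % 1000000007)) % 1000000007 = (a * b) % 1000000007 := by
  rw [Int.mul_emod, Int.emod_emod_of_dvd _ dvd_rfl, ← Int.mul_emod]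

theorem bGo_W (N : Nat) : ∀ nums : List Int,
    nums.length ≤ N → (bGo (bBuild nums)).2 = W nums := by
  induction N with
  | zero =>
    intro nums hN
    rcases nums with _ | ⟨a, t⟩
    · rw [W.eq_def]; simp [bBuild, bGo]
    · simp at hN
  | succ N IH =>
    intro nums hN
    by_cases h3 : nums.length < 3
    · rw [W.eq_def, if_pos h3]
      rcases nums with _ | ⟨a, _ | ⟨b, _ | ⟨c, rest⟩⟩⟩
      · simp [bBuild, bGo]
      · rw [show bBuild [a] = .node a .leaf .leaf from rfl, bGo_node]
        norm_num [show bGo BTree.leaf = (0, 1) from rfl, bComb_zero, pvModB]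
      · by_cases hba : b < a
        · rw [show bBuild [a, b] = bInsert (.node a .leaf .leaf) b from rfl]
          rw [show bInsert (BTree.node a .leaf .leaf) b
              = .node a (.node b .leaf .leaf) .leaf from by simp [bInsert, hba]]
          rw [bGo_node, bGo_node]
          norm_num [show bGo BTree.leaf = (0, 1) from rfl, bComb_zero, pvModB,
            show bComb 1 1 = 1 from by decide]
        · rw [show bBuild [a, b] = bInsert (.node a .leaf .leaf) b from rfl]
          rw [show bInsert (BTree.node a .leaf .leaf) b
              = .node a .leaf (.node b .leaf .leaf) from by simp [bInsert, hba]]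
          rw [bGo_node, bGo_node]
          norm_num [show bGo BTree.leaf = (0, 1) from rfl, bComb_zero, pvModB,
            show bComb 1 0 = 1 from by decide]
      · simp only [List.length_cons] at h3; omega
    · rcases nums with _ | ⟨h, t⟩
      · simp at h3
      · have hb : bBuild (h :: t)
            = BTree.node h (bBuild (t.filter fun x => decide (x < h)))
                (bBuild (t.filter fun x => !decide (x < h))) := by
          rw [bBuild, List.foldl_cons, show bInsert BTree.leaf h
              = BTree.node h BTree.leaf BTree.leaf from rfl]
          exact insertAll_node h t BTree.leaf BTree.leaf
        have hlenlm : (t.filter fun x => decide (x < h)).length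
            + (t.filter fun x => !decide (x < h)).length = t.length := by
          exact (List.length_eq_length_filter_add (fun x => decide (x < h))).symm
        have hl1 : (t.filter fun x => decide (x < h)).length ≤ t.length := by omega
        have hNt : t.length ≤ N := by simp only [List.length_cons] at hN; omega
        have hWl := IH (t.filter fun x => decide (x < h)) (by omega)
        have hWr := IH (t.filter fun x => !decide (x < h)) (by omega)
        rw [hb, bGo_node]
        simp only [bBuild_fst, hWl, hWr]
        rw [show ((t.filter fun x => decide (x < h)).length : Int)
              + ((t.filter fun x => !decide (x < h)).length : Int) + 1 - 1
            = ((t.length : Nat) : Int) by omega]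
        rw [bComb_choose t.length (t.filter fun x => decide (x < h)).length hl1]
        rw [W_cons h t h3, partA_eq_filter]
        rw [show cSpec t.length (t.filter fun x => decide (x < h)).length
            = ((Nat.choose t.length (t.filter fun x => decide (x < h)).length : Nat) : Int)
                % 1000000007 from by unfold cSpec; omega]
        simp only [pvModA, pvModB]
        simp only [emod_mul_left, emod_mul_right]
        congr 1
        ring

-- ===== VERDICT (by name: the statement is the Claim_ definition above) =====
theorem numOfWaysRec_spec : Claim_equal_numOfWaysRec := by
  intro nums memo _hdom hpre
  unfold Spec_numOfWaysRec numOfWaysRec numOfWaysRec_alt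
  rw [bGo_W nums.length nums le_rfl]
  by_cases h3 : nums.length < 3
  · rw [recA, dif_pos h3, W.eq_def, if_pos h3]
  · obtain ⟨hlen, hrows⟩ := hpre.resolve_left h3
    have hG : GoodM memo nums.length := by
      intro m n row v hmk hn1 hnm hrow hcell
      have h := (hrows m hmk).2 n hn1 hnm
      have hrowD : memo.getD m [] = row := by
        rw [List.getD_eq_getElem?_getD, hrow]; rfl
      rw [hrowD, List.getD_eq_getElem?_getD, hcell] at h
      simp at h
    have hS : ShapeM memo nums.length := by
      refine ⟨hlen, fun i row hik hrow => ?_⟩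
      have h := (hrows i hik).1
      have hrowD : memo.getD i [] = row := by
        rw [List.getD_eq_getElem?_getD, hrow]; rfl
      rw [hrowD] at h
      exact h
    obtain ⟨memo', he, -, -⟩ :=
      recA_correct nums.length nums memo nums.length le_rfl hG hS le_rfl
    rw [he]
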